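-- pv_equiv track=rewrite | github.com/Acif/CSC361 | p1/tester.py | detect_http2_support
-- ===== SOURCE A (Python) =====
-- from typing import Tuple, List, Optional
--
-- def get_header_field_values(header: str, name_lc: str) -> List[str]:
--     values = []
--     for line in header.split("\r\n"):
--         if ":" not in line:
--             continue
--         k, v = line.split(":", 1)
--         if k.strip().lower() == name_lc:
--             values.append(v.strip())
--     return values
--
-- def detect_http2_support(headers_seen: List[str], status_lines: List[str], alpn_selected: Optional[str]) -> str:
--     # 1) If ALPN probe picked 'h2', the server supports HTTP/2.
--     if (alpn_selected or "").lower() == "h2":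
--         return "yes"
--
--     # 2) Heuristics in headers
--     for sl in status_lines:
--         if sl.upper().startswith("HTTP/2"):
--             return "yes"
--
--     for h in headers_seen:
--         alt_svc = " ".join(get_header_field_values(h, "alt-svc")).lower()
--         if "h2" in alt_svc:
--             return "yes"
--         upgrades = ",".join(get_header_field_values(h, "upgrade")).lower()
--         if "h2c" in upgrades:
--             return "yes"
--
--     return "no"
-- ===== SOURCE B (Python) =====
-- from typing import List, Optional
--
-- def detect_http2_support(headers_seen: List[str], status_lines: List[str], alpn_selected: Optional[str]) -> str:
--     # Line-level detection: no per-field value collection and no string joins.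
--     # A single "name: value" line decides by itself, because the needles "h2"/"h2c"
--     # contain neither of A's join separators (' ' / ','), so a substring match in
--     # A's joined string can never straddle two values.
--     def line_signal(line):
--         if ":" not in line:
--             return False
--         k, v = line.split(":", 1)
--         key = k.strip().lower()
--         val = v.strip().lower()
--         return (key == "alt-svc" and "h2" in val) or (key == "upgrade" and "h2c" in val)
--
--     if (alpn_selected or "").lower() == "h2":
--         return "yes"
--     if any(sl.upper().startswith("HTTP/2") for sl in status_lines):
--         return "yes"
--     if any(line_signal(line) for h in headers_seen for line in h.split("\r\n")):
--         return "yes"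
--     return "no"
-- ===== Notes on version B (the rewrite author's own statement) =====
-- stated objective: simpler
-- what changed: B drops A's per-field value collection (get_header_field_values called twice per header) and the ' '/',' joins entirely: each header line is tested once by a pure predicate (key is alt-svc and value contains h2, or key is upgrade and value contains h2c) and the results are OR-ed flat over all lines of all headers; correct because the needles 'h2'/'h2c' contain no join separator, so a match in A's joined string never straddles two values (proved in Lean).
import Mathlib
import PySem

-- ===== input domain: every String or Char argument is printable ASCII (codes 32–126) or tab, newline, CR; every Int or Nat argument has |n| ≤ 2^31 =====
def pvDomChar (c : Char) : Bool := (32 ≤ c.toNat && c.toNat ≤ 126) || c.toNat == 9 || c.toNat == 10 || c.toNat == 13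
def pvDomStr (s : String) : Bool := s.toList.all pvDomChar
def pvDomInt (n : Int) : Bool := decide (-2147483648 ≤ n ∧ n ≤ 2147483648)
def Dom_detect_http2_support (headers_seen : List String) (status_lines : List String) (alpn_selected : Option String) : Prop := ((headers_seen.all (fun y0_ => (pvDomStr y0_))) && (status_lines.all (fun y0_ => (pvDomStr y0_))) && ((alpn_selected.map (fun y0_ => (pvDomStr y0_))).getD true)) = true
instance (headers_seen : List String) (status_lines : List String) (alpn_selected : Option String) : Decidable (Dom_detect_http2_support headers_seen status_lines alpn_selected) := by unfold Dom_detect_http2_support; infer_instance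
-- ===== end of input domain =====

-- ===== PORT A =====
-- B replaces A's per-field collection + join + substring search by a flat per-line
-- predicate OR-ed over all header lines (objective: simpler; same return value).

-- one iteration of the loop body of get_header_field_values
def pvAStep (name_lc : String) (values : List String) (line : String) : List String :=
  if PySem.Str.isIn ":" line then
    match PySem.Str.splitMax? line ":" 1 with
    | some (k :: v :: _) =>
        if PySem.Str.lower (PySem.Str.strip k) == name_lc then
          values ++ [PySem.Str.strip v]
        else values
    | _ => values   -- unreachable: ':' in line gives exactly two pieces (totality guard)
  else values

def pvGetHeaderFieldValues (header : String) (name_lc : String) : List String :=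
  ((PySem.Str.split? header "\r\n").getD []).foldl (pvAStep name_lc) []

def pvALoopHeaders : List String → String
  | [] => "no"
  | h :: rest =>
      let alt_svc := PySem.Str.lower (PySem.Str.join " " (pvGetHeaderFieldValues h "alt-svc"))
      if PySem.Str.isIn "h2" alt_svc then "yes"
      else
        let upgrades := PySem.Str.lower (PySem.Str.join "," (pvGetHeaderFieldValues h "upgrade"))
        if PySem.Str.isIn "h2c" upgrades then "yes"
        else pvALoopHeaders rest

def pvALoopStatus (headers_seen : List String) : List String → String
  | [] => pvALoopHeaders headers_seen
  | sl :: rest =>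
      if PySem.Str.startswith (PySem.Str.upper sl) "HTTP/2" then "yes"
      else pvALoopStatus headers_seen rest

def detect_http2_support (headers_seen : List String) (status_lines : List String) (alpn_selected : Option String) : String :=
  if PySem.Str.lower (alpn_selected.getD "") == "h2" then "yes"
  else pvALoopStatus headers_seen status_lines

-- ===== PORT B =====
-- B's per-line predicate: does this single header line signal HTTP/2 support?
def pvLineSignal (line : String) : Bool :=
  if PySem.Str.isIn ":" line then
    match PySem.Str.splitMax? line ":" 1 with
    | some (k :: v :: _) =>
        let key := PySem.Str.lower (PySem.Str.strip k)
        let val := PySem.Str.lower (PySem.Str.strip v)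
        (key == "alt-svc" && PySem.Str.isIn "h2" val) || (key == "upgrade" && PySem.Str.isIn "h2c" val)
    | _ => false   -- unreachable (totality guard)
  else false

def detect_http2_support_alt (headers_seen : List String) (status_lines : List String) (alpn_selected : Option String) : String :=
  if PySem.Str.lower (alpn_selected.getD "") == "h2" then "yes"
  else if status_lines.any (fun sl => PySem.Str.startswith (PySem.Str.upper sl) "HTTP/2") then "yes"
  else if headers_seen.any (fun h => ((PySem.Str.split? h "\r\n").getD []).any pvLineSignal) then "yes"
  else "no"

-- ===== PRECONDITION & SPEC =====
def Spec_detect_http2_support (headers_seen : List String) (status_lines : List String) (alpn_selected : Option String) (out : String) : Prop := out = detect_http2_support_alt headers_seen status_lines alpn_selected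
instance (headers_seen : List String) (status_lines : List String) (alpn_selected : Option String) (out : String) : Decidable (Spec_detect_http2_support headers_seen status_lines alpn_selected out) := by unfold Spec_detect_http2_support; infer_instance

-- ===== CLAIM (what is proved, stated in full; the proofs are below) =====
def Claim_equal_detect_http2_support : Prop := ∀ (headers_seen : List String) (status_lines : List String) (alpn_selected : Option String), Dom_detect_http2_support headers_seen status_lines alpn_selected → Spec_detect_http2_support headers_seen status_lines alpn_selected (detect_http2_support headers_seen status_lines alpn_selected)

-- ===== LEMMAS AND PROOFS =====

-- what pvAStep appends for one line, as an Option
def pvExtract (name_lc : String) (line : String) : Option String :=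
  if PySem.Str.isIn ":" line then
    match PySem.Str.splitMax? line ":" 1 with
    | some (k :: v :: _) =>
        if PySem.Str.lower (PySem.Str.strip k) == name_lc then some (PySem.Str.strip v) else none
    | _ => none
  else none

theorem pvAStep_eq (name : String) (acc : List String) (line : String) :
    pvAStep name acc line = acc ++ (pvExtract name line).toList := by
  unfold pvAStep pvExtract
  by_cases hc : PySem.Str.isIn ":" line = true
  · rw [if_pos hc, if_pos hc]
    cases hsp : PySem.Str.splitMax? line ":" 1 with
    | none => simp
    | some parts =>
        match parts with
        | [] => simp
        | [k] => simp
        | k :: v :: tail =>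
            by_cases hk : (PySem.Str.lower (PySem.Str.strip k) == name) = true <;> simp [hk]
  · rw [if_neg hc, if_neg hc]; simp

theorem pvFoldl_extract (name : String) (lines : List String) (acc : List String) :
    lines.foldl (pvAStep name) acc = acc ++ lines.filterMap (pvExtract name) := by
  induction lines generalizing acc with
  | nil => simp
  | cons l rest ih =>
      simp only [List.foldl_cons, List.filterMap_cons]
      rw [ih, pvAStep_eq]
      cases pvExtract name l <;> simp

theorem pvGHFV_eq (h name : String) :
    pvGetHeaderFieldValues h name = ((PySem.Str.split? h "\r\n").getD []).filterMap (pvExtract name) := by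
  unfold pvGetHeaderFieldValues
  rw [pvFoldl_extract]; simp

-- a prefix of u ++ c :: w avoiding c is a prefix of u
theorem pvPrefix_avoid (c : Char) : ∀ (p u : List Char) (w : List Char),
    p <+: u ++ c :: w → c ∉ p → p <+: u := by
  intro p
  induction p with
  | nil => intro u w _ _; exact List.nil_prefix
  | cons x p' ih =>
      intro u w hp hm
      cases u with
      | nil =>
          simp only [List.nil_append] at hp
          rcases List.cons_prefix_cons.mp hp with ⟨hx, _⟩
          exact absurd (hx ▸ List.mem_cons_self) hm
      | cons y u' =>
          rcases List.cons_prefix_cons.mp hp with ⟨hx, hp'⟩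
          exact hx ▸ List.cons_prefix_cons.mpr ⟨rfl, ih u' w hp' (fun hmem => hm (List.mem_cons_of_mem _ hmem))⟩

-- an infix of u ++ c :: w avoiding c (and nonempty) lies in u or in w
theorem pvInfix_append_cons (c : Char) (sub : List Char) (hs : sub ≠ []) (hc : c ∉ sub) :
    ∀ (a b : List Char), (sub <:+: a ++ c :: b) ↔ (sub <:+: a ∨ sub <:+: b) := by
  intro a
  induction a with
  | nil =>
      intro b
      constructor
      · intro h
        rcases List.infix_cons_iff.mp h with hpre | hinf
        · cases sub with
          | nil => exact absurd rfl hs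
          | cons x s' =>
              rcases List.cons_prefix_cons.mp hpre with ⟨hx, _⟩
              exact absurd (hx ▸ List.mem_cons_self) hc
        · exact Or.inr hinf
      · rintro (h | h)
        · rw [List.infix_iff_prefix_suffix] at h
          rcases h with ⟨t, hpt, hts⟩
          rw [List.suffix_nil] at hts
          subst hts
          rw [List.prefix_nil] at hpt
          exact absurd hpt hs
        · exact List.infix_cons_iff.mpr (Or.inr h)
  | cons y a' ih =>
      intro b
      constructor
      · intro h
        rcases List.infix_cons_iff.mp h with hpre | hinf
        · cases sub with
          | nil => exact absurd rfl hs
          | cons x s' =>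
              rcases List.cons_prefix_cons.mp hpre with ⟨hx, hp'⟩
              have hs' : s' <+: a' := pvPrefix_avoid c s' a' b hp' (fun hm => hc (List.mem_cons_of_mem _ hm))
              exact Or.inl (List.infix_cons_iff.mpr (Or.inl (hx ▸ List.cons_prefix_cons.mpr ⟨rfl, hs'⟩)))
        · rcases (ih b).mp hinf with h1 | h1
          · exact Or.inl (List.infix_cons_iff.mpr (Or.inr h1))
          · exact Or.inr h1
      · rintro (h | h)
        · exact List.infix_append_of_infix_left h
        · exact List.infix_append_of_infix_right (List.infix_cons_iff.mpr (Or.inr h))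

-- an infix of [c].join parts avoiding c lies in one of the parts
theorem pvInfix_join (c : Char) (sub : List Char) (hs : sub ≠ []) (hc : c ∉ sub) :
    ∀ (parts : List (List Char)), (sub <:+: PySem.Chars.join [c] parts) ↔ ∃ p ∈ parts, sub <:+: p := by
  intro parts
  induction parts with
  | nil =>
      rw [PySem.Chars.join_nil]
      simp [List.infix_nil, hs]
  | cons p rest ih =>
      cases rest with
      | nil => rw [PySem.Chars.join_singleton]; simp
      | cons q rest' =>
          rw [PySem.Chars.join_cons_cons]
          have hshape : p ++ [c] ++ PySem.Chars.join [c] (q :: rest')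
              = p ++ c :: PySem.Chars.join [c] (q :: rest') := by simp
          rw [hshape, pvInfix_append_cons c sub hs hc, ih]
          simp

-- lowercasing commutes with the single-character join
theorem pvLower_join (c : Char) (parts : List (List Char)) :
    PySem.Chars.lower (PySem.Chars.join [c] parts) =
      PySem.Chars.join [PySem.Chars.lowerChar c] (parts.map PySem.Chars.lower) := by
  induction parts with
  | nil => simp [PySem.Chars.join_nil, PySem.Chars.lower]
  | cons p rest ih =>
      cases rest with
      | nil => simp [PySem.Chars.join_singleton]
      | cons q rest' =>
          simp only [List.map_cons] at ih ⊢
          rw [PySem.Chars.join_cons_cons, PySem.Chars.join_cons_cons, ← ih]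
          simp [PySem.Chars.lower]

-- the key fact: A's "needle in lowered join" equals "some value's lowered form contains the needle"
theorem pvIsIn_lower_join (c : Char) (sep sub : String) (hsep : sep.toList = [c])
    (hlc : PySem.Chars.lowerChar c = c) (hs : sub.toList ≠ []) (hc : c ∉ sub.toList)
    (vals : List String) :
    PySem.Str.isIn sub (PySem.Str.lower (PySem.Str.join sep vals)) =
      vals.any (fun v => PySem.Str.isIn sub (PySem.Str.lower v)) := by
  rw [Bool.eq_iff_iff, PySem.Str.isIn_iff_infix, List.any_eq_true]
  rw [PySem.Str.toList_lower, PySem.Str.toList_join, hsep, pvLower_join, hlc,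
      pvInfix_join c sub.toList hs hc]
  constructor
  · rintro ⟨p, hp, hinf⟩
    rw [List.mem_map] at hp
    rcases hp with ⟨cs, hcs, rfl⟩
    rw [List.mem_map] at hcs
    rcases hcs with ⟨v, hv, rfl⟩
    exact ⟨v, hv, (PySem.Str.isIn_iff_infix _ _).mpr (by rw [PySem.Str.toList_lower]; exact hinf)⟩
  · rintro ⟨v, hv, h⟩
    rw [PySem.Str.isIn_iff_infix, PySem.Str.toList_lower] at h
    exact ⟨PySem.Chars.lower v.toList,
      by simp only [List.map_map]; exact List.mem_map.mpr ⟨v, hv, rfl⟩, h⟩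

-- B's per-line predicate, in terms of A's per-line extraction for the two field names
theorem pvLineSignal_eq (line : String) :
    pvLineSignal line =
      ((pvExtract "alt-svc" line).any (fun v => PySem.Str.isIn "h2" (PySem.Str.lower v))
       || (pvExtract "upgrade" line).any (fun v => PySem.Str.isIn "h2c" (PySem.Str.lower v))) := by
  unfold pvLineSignal pvExtract
  by_cases hcl : PySem.Str.isIn ":" line = true
  · rw [if_pos hcl, if_pos hcl, if_pos hcl]
    cases hsp : PySem.Str.splitMax? line ":" 1 with
    | none => simp
    | some parts =>
        match parts with
        | [] => simp
        | [k] => simp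
        | k :: v :: tail =>
            by_cases h1 : (PySem.Str.lower (PySem.Str.strip k) == "alt-svc") = true
            · have h2 : (PySem.Str.lower (PySem.Str.strip k) == "upgrade") = false := by
                rw [beq_iff_eq] at h1
                rw [h1]; decide
              simp [h1, h2]
            · rw [Bool.not_eq_true] at h1
              by_cases h2 : (PySem.Str.lower (PySem.Str.strip k) == "upgrade") = true
              · simp [h1, h2]
              · rw [Bool.not_eq_true] at h2
                simp [h1, h2]
  · rw [Bool.not_eq_true] at hcl
    have hcl' : PySem.Chars.isIn [':'] line.toList = false := hcl
    simp [hcl']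

-- any over an OR of two per-element predicates splits
theorem pvAnyOr (l : List String) (f g : String → Bool) :
    (l.any fun x => f x || g x) = (l.any f || l.any g) := by
  induction l with
  | nil => rfl
  | cons x t ih => simp [List.any_cons, ih]; ac_rfl

-- one header: A's two collect+join+search checks equal B's flat line scan
theorem pvHeader_eq (h : String) :
    (PySem.Str.isIn "h2" (PySem.Str.lower (PySem.Str.join " " (pvGetHeaderFieldValues h "alt-svc")))
     || PySem.Str.isIn "h2c" (PySem.Str.lower (PySem.Str.join "," (pvGetHeaderFieldValues h "upgrade"))))
      = ((PySem.Str.split? h "\r\n").getD []).any pvLineSignal := by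
  rw [pvGHFV_eq, pvGHFV_eq,
      pvIsIn_lower_join ' ' " " "h2" (by decide) (by decide) (by decide) (by decide),
      pvIsIn_lower_join ',' "," "h2c" (by decide) (by decide) (by decide) (by decide),
      List.any_filterMap, List.any_filterMap, ← pvAnyOr]
  refine List.any_congr rfl fun line => ?_
  show _ = pvLineSignal line
  rw [pvLineSignal_eq]
  cases hx1 : pvExtract "alt-svc" line <;> cases hx2 : pvExtract "upgrade" line <;>
    simp [Option.any]

theorem pvALoopHeaders_eq (headers : List String) :
    pvALoopHeaders headers =
      if headers.any (fun h => ((PySem.Str.split? h "\r\n").getD []).any pvLineSignal) then "yes" else "no" := by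
  induction headers with
  | nil => rfl
  | cons h rest ih =>
      simp only [pvALoopHeaders, List.any_cons, ih, ← pvHeader_eq h]
      cases h1 : PySem.Str.isIn "h2" (PySem.Str.lower (PySem.Str.join " " (pvGetHeaderFieldValues h "alt-svc"))) <;>
        cases h2 : PySem.Str.isIn "h2c" (PySem.Str.lower (PySem.Str.join "," (pvGetHeaderFieldValues h "upgrade"))) <;>
          simp

theorem pvALoopStatus_eq (headers status : List String) :
    pvALoopStatus headers status =
      if status.any (fun sl => PySem.Str.startswith (PySem.Str.upper sl) "HTTP/2") then "yes"
      else if headers.any (fun h => ((PySem.Str.split? h "\r\n").getD []).any pvLineSignal) then "yes"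
      else "no" := by
  induction status with
  | nil => simpa using pvALoopHeaders_eq headers
  | cons sl rest ih =>
      simp only [pvALoopStatus, List.any_cons, ih]
      by_cases hs : PySem.Str.startswith (PySem.Str.upper sl) "HTTP/2" = true
      · simp only [hs, Bool.true_or, if_true]
      · rw [Bool.not_eq_true] at hs
        simp only [hs, Bool.false_or, Bool.false_eq_true, if_false]

-- ===== VERDICT (by name: the statement is the Claim_ definition above) =====
theorem detect_http2_support_spec : Claim_equal_detect_http2_support := by
  intro headers status alpn _
  unfold Spec_detect_http2_support detect_http2_support detect_http2_support_alt
  rw [pvALoopStatus_eq]
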